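-- pv_equiv track=rewrite | github.com/StiopE/harbour.space-Stepan-Panteleev- | lectures/01/exercises/problems.py | sum_until_negative
-- ===== SOURCE A (Python) =====
-- def sum_until_negative(numbers: list[int]) -> int:
--     """Return sum of numbers until the first negative value (exclusive)."""
--
--     sums = 0
--     for i in range(len(numbers)):
--         if numbers[i] < 0:
--             return sums
--         else:
--             sums += numbers[i]
--     return sums
-- ===== SOURCE B (Python) =====
-- def sum_until_negative(numbers: list[int]) -> int:
--     """Return sum of numbers until the first negative value (exclusive).
--
--     Right-to-left pass: walk the list backwards keeping a running sum and
--     reset it to 0 at every negative element; after the whole pass the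
--     accumulator holds the sum of the elements before the FIRST negative.
--     """
--     acc = 0
--     for x in reversed(numbers):
--         acc = 0 if x < 0 else x + acc
--     return acc
-- ===== Notes on version B (the rewrite author's own statement) =====
-- stated objective: alternative
-- what changed: B walks the list right-to-left with no early exit, resetting the running sum to 0 at each negative element; the final accumulator equals the sum of the prefix before the first negative, replacing A's left-to-right index loop with early return.
import Mathlib
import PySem

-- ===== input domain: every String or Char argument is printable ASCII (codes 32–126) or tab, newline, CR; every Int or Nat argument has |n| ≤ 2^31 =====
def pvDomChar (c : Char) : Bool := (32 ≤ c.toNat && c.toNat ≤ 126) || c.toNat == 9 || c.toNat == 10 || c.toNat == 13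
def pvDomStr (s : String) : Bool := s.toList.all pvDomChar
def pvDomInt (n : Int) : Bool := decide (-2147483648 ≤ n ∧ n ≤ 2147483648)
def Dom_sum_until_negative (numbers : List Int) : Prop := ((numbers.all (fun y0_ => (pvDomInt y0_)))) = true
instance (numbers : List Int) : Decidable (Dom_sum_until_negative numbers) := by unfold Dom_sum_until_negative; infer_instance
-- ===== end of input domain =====

-- B traverses the list right-to-left with no early exit, resetting the running
-- sum to 0 at each negative; same values, same O(n) cost (objective: alternative).

-- ===== PORT A =====
-- A's `for i in range(len(numbers))` with early return: recursion over the
-- remaining elements carrying the accumulator `sums`.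
def sumA_loop (rest : List Int) (sums : Int) : Int :=
  match rest with
  | [] => sums
  | x :: xs => if x < 0 then sums else sumA_loop xs (sums + x)

def sum_until_negative (numbers : List Int) : Int :=
  sumA_loop numbers 0

-- ===== PORT B =====
-- Source B: `for x in reversed(numbers): acc = 0 if x < 0 else x + acc`
def sum_until_negative_alt (numbers : List Int) : Int :=
  numbers.reverse.foldl (fun acc x => if x < 0 then 0 else x + acc) 0

-- ===== PRECONDITION & SPEC =====
def Spec_sum_until_negative (numbers : List Int) (out : Int) : Prop := out = sum_until_negative_alt numbers
instance (numbers : List Int) (out : Int) : Decidable (Spec_sum_until_negative numbers out) := by unfold Spec_sum_until_negative; infer_instance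

-- ===== CLAIM =====
def Claim_equal_sum_until_negative : Prop := ∀ (numbers : List Int), Dom_sum_until_negative numbers → Spec_sum_until_negative numbers (sum_until_negative numbers)

-- ===== LEMMAS AND PROOFS =====
theorem sumA_loop_eq (rest : List Int) (sums : Int) :
    sumA_loop rest sums = sums + (rest.takeWhile (fun x => x ≥ 0)).sum := by
  induction rest generalizing sums with
  | nil => simp [sumA_loop]
  | cons x xs ih =>
    simp only [sumA_loop, List.takeWhile_cons]
    by_cases h : x < 0
    · have : ¬ (x ≥ 0) := by omega
      simp [h, this]
    · have hx : x ≥ 0 := by omega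
      simp [h, hx, ih, List.sum_cons]
      ring

theorem sumB_eq (numbers : List Int) :
    sum_until_negative_alt numbers = (numbers.takeWhile (fun x => x ≥ 0)).sum := by
  unfold sum_until_negative_alt
  rw [List.foldl_reverse]
  induction numbers with
  | nil => simp
  | cons x xs ih =>
    simp only [List.foldr_cons, List.takeWhile_cons, ih]
    by_cases h : x < 0
    · have : ¬ (x ≥ 0) := by omega
      simp [h, this]
    · have hx : x ≥ 0 := by omega
      simp [h, hx]

-- ===== VERDICT =====
theorem sum_until_negative_spec : Claim_equal_sum_until_negative := by
  intro numbers _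
  unfold Spec_sum_until_negative sum_until_negative
  rw [sumB_eq, sumA_loop_eq]
  ring
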